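-- pv_equiv track=rewrite | github.com/miliar/Code_Jam_Webscraper | solutions_python/Problem_178/4386.py | f
-- ===== SOURCE A (Python) =====
-- def flip(s):
--     return ''.join('+' if c == '-' else '-' for c in s)
--
-- def f(s):
--     n = 0
--     while s:
--         if s[-1] == '-':
--             n += 1
--             s = flip(s)
--         s = s[:-1]
--     return n
-- ===== SOURCE B (Python) =====
-- def f(s):
--     n = 0
--     p = False
--     for c in reversed(s):
--         if (c == '-') != p:
--             n += 1
--             p = not p
--     return n
-- ===== Notes on version B (the rewrite author's own statement) =====
-- stated objective: faster
-- what changed: Replaces the loop that materializes a flipped copy of the whole string on every '-' with a single right-to-left scan tracking flip parity in a boolean.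
import Mathlib
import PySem

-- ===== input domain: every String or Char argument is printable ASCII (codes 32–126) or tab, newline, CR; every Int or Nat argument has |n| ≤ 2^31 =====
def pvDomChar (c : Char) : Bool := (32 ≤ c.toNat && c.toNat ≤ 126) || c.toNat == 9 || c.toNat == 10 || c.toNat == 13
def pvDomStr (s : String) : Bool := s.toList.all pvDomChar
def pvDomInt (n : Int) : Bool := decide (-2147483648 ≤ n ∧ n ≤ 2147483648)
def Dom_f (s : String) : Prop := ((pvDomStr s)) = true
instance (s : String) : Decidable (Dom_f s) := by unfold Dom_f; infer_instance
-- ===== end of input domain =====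

-- B replaces A's repeated whole-string flips with one right-to-left scan tracking flip parity (O(n) vs O(n^2)).

-- ===== PORT A =====
-- flip(s): '+' if c == '-' else '-'
def flipc (c : Char) : Char := if c = '-' then '+' else '-'

-- the while loop: test s[-1], possibly flip the whole string, then drop the last char
def fGo : List Char → Int
  | [] => 0
  | c :: t =>
      (if (c :: t).getLast? = some '-' then (1 : Int) else 0) +
        fGo ((if (c :: t).getLast? = some '-' then (c :: t).map flipc else (c :: t)).dropLast)
termination_by l => l.length
decreasing_by
  simp only [List.length_dropLast]
  split <;> simp

def f (s : String) : Int := fGo s.toList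

-- ===== PORT B =====
def hGo : List Char → Bool → Int
  | [], _ => 0
  | c :: t, p => if (decide (c = '-')) != p then 1 + hGo t (!p) else hGo t p

def f_alt (s : String) : Int := hGo s.toList.reverse false

-- ===== PRECONDITION & SPEC =====
def Spec_f (s : String) (out : Int) : Prop := out = f_alt s
instance (s : String) (out : Int) : Decidable (Spec_f s out) := by unfold Spec_f; infer_instance

-- ===== CLAIM (what is proved, stated in full; the proofs are below) =====
def Claim_equal_f : Prop := ∀ (s : String), Dom_f s → Spec_f s (f s)

-- ===== LEMMAS AND PROOFS =====

-- a char that is not '-' after two flips becomes '+'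
def posc (c : Char) : Char := if c = '-' then '-' else '+'

theorem flipc_flipc (c : Char) : flipc (flipc c) = posc c := by
  unfold flipc posc; split <;> simp

theorem flipc_posc (c : Char) : flipc (posc c) = flipc c := by
  unfold flipc posc; split <;> simp

theorem fGo_concat (t : List Char) (c : Char) :
    fGo (t ++ [c]) =
      (if c = '-' then (1 : Int) + fGo (t.map flipc) else fGo t) := by
  cases t with
  | nil =>
      rw [List.nil_append, fGo]
      by_cases hc : c = '-' <;> simp [hc, fGo, List.map, flipc]
  | cons a u =>
      rw [show (a :: u) ++ [c] = a :: (u ++ [c]) from rfl]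
      rw [fGo]
      rw [show a :: (u ++ [c]) = (a :: u) ++ [c] from rfl]
      rw [List.getLast?_concat]
      by_cases hc : c = '-'
      · subst hc
        rw [if_pos rfl, if_pos rfl, if_pos rfl, List.map_append]
        rw [show List.map flipc ['-'] = [flipc '-'] from rfl]
        rw [List.dropLast_concat]
      · have hne : ¬ (some c = some '-') := by simpa using hc
        rw [if_neg hne, if_neg hne, if_neg hc, List.dropLast_concat]
        simp

theorem main_inv (l : List Char) :
    fGo l = hGo l.reverse false ∧
    fGo (l.map flipc) = hGo l.reverse true ∧
    fGo (l.map posc) = hGo l.reverse false := by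
  induction l using List.reverseRecOn with
  | nil => simp [fGo, hGo]
  | append_singleton t c ih =>
      obtain ⟨ih1, ih2, ih3⟩ := ih
      have hmap2 : (t.map flipc).map flipc = t.map posc := by
        simp [List.map_map, Function.comp_def, flipc_flipc]
      have hmap3 : (t.map posc).map flipc = t.map flipc := by
        simp [List.map_map, Function.comp_def, flipc_posc]
      refine ⟨?_, ?_, ?_⟩
      · rw [fGo_concat]
        by_cases hc : c = '-' <;> simp [hc, hGo, ih1, ih2]
      · rw [List.map_append, List.map_singleton, fGo_concat, hmap2]
        by_cases hc : c = '-' <;> simp [hc, flipc, hGo, ih2, ih3]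
      · rw [List.map_append, List.map_singleton, fGo_concat, hmap3]
        by_cases hc : c = '-' <;> simp [hc, posc, hGo, ih2, ih3]

-- ===== VERDICT (by name: the statement is the Claim_ definition above) =====
theorem f_spec : Claim_equal_f := by
  intro s _
  unfold Spec_f f f_alt
  exact (main_inv s.toList).1
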